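-- pv_equiv track=rewrite | github.com/haolunc/ARC-RL | reference_solutions/solutions/67e8384a.py | transform
-- ===== SOURCE A (Python) =====
-- def transform(grid):
--     n = len(grid)
--
--     h = [list(reversed(row)) for row in grid]
--
--     v = list(reversed(grid))
--
--     r = [list(reversed(row)) for row in reversed(grid)]
--
--     top = [grid[i] + h[i] for i in range(n)]
--     bottom = [v[i] + r[i] for i in range(n)]
--     return top + bottom
-- ===== SOURCE B (Python) =====
-- def transform(grid):
--     n = len(grid)
--     out = []
--     for r in range(2 * n):
--         s = grid[r] if r < n else grid[2 * n - 1 - r]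
--         m = len(s)
--         out.append([s[c] if c < m else s[2 * m - 1 - c] for c in range(2 * m)])
--     return out
-- ===== Notes on version B (the rewrite author's own statement) =====
-- stated objective: alternative
-- what changed: B builds the 2n x 2n output cell-by-cell with a single index-reflection map over source rows/columns instead of constructing four reflected block grids (h, v, r) and concatenating them.
import Mathlib
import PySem

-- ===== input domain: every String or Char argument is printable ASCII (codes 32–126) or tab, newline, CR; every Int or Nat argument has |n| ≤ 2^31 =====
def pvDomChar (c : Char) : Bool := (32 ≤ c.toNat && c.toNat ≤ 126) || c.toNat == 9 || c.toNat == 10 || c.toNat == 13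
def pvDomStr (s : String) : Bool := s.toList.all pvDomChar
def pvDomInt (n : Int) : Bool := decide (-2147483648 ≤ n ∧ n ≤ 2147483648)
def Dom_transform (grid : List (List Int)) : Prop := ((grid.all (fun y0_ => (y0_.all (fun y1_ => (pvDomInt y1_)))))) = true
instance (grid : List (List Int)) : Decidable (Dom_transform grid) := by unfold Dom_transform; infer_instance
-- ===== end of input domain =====

-- B builds the output grid cell-by-cell by one index-reflection map instead of A's four pre-computed reflected block grids; same cost, different decomposition.

-- ===== PORT A =====
-- literal port of A: h/v/r block grids, then top/bottom assembled by indexing over range(n);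
-- the indices i in range(n) are always in range, so pyGetD with a dummy default is exact
def transform (grid : List (List Int)) : List (List Int) :=
  let n : Int := grid.length
  let h := grid.map (fun row => row.reverse)
  let v := grid.reverse
  let r := grid.reverse.map (fun row => row.reverse)
  let top := (PySem.List.pyRange 0 n 1).map
    (fun i => PySem.List.pyGetD grid i [] ++ PySem.List.pyGetD h i [])
  let bottom := (PySem.List.pyRange 0 n 1).map
    (fun i => PySem.List.pyGetD v i [] ++ PySem.List.pyGetD r i [])
  top ++ bottom

-- ===== PORT B =====
-- literal port of Source B: one loop over output rows, each row built by a column-index-reflection map;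
-- all indices used are in range, so pyGetD with a dummy default is exact
def transform_alt (grid : List (List Int)) : List (List Int) :=
  let n : Int := grid.length
  (PySem.List.pyRange 0 (2 * n) 1).foldl
    (fun out r =>
      let s := PySem.List.pyGetD grid (if r < n then r else 2 * n - 1 - r) []
      let m : Int := s.length
      out ++ [(PySem.List.pyRange 0 (2 * m) 1).map
        (fun c => PySem.List.pyGetD s (if c < m then c else 2 * m - 1 - c) 0)]) []

-- ===== PRECONDITION & SPEC =====
def Spec_transform (grid : List (List Int)) (out : List (List Int)) : Prop := out = transform_alt grid
instance (grid : List (List Int)) (out : List (List Int)) : Decidable (Spec_transform grid out) := by unfold Spec_transform; infer_instance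

-- ===== CLAIM (what is proved, stated in full; the proofs are below) =====
def Claim_equal_transform : Prop := ∀ (grid : List (List Int)), Dom_transform grid → Spec_transform grid (transform grid)

-- ===== LEMMAS AND PROOFS =====

-- reading a list with getD at every k in range(len) is a map over the list
theorem map_range_getD {α β : Type} (g : α → β) (d : α) (xs : List α) :
    (List.range xs.length).map (fun k => g (xs.getD k d)) = xs.map g := by
  induction xs with
  | nil => simp
  | cons a xs ih =>
    simp only [List.length_cons, List.range_succ_eq_map, List.map_cons, List.map_map]
    refine congrArg₂ _ (by simp) ?_
    simpa [Function.comp, List.getD_cons_succ] using ih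

-- reading a list with getD at the mirrored index len-1-k is a map over its reverse
theorem map_range_getD_rev {α β : Type} (g : α → β) (d : α) (xs : List α) :
    (List.range xs.length).map (fun k => g (xs.getD (xs.length - 1 - k) d)) = xs.reverse.map g := by
  rw [← map_range_getD g d xs.reverse, List.length_reverse]
  refine List.map_congr_left (fun k hk => ?_)
  rw [List.mem_range] at hk
  rw [List.getD_eq_getElem?_getD, List.getD_eq_getElem?_getD, List.getElem?_reverse hk]

-- an in-range nonnegative Int index turns pyGetD into Nat-indexed getD
theorem pyGetD_int_eq_getD {α : Type} (xs : List α) (d : α) (i : Int)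
    (h0 : 0 ≤ i) (h1 : i < (xs.length : Int)) :
    PySem.List.pyGetD xs i d = xs.getD i.toNat d := by
  rw [PySem.List.pyGetD_eq_getElem xs d h0 h1, List.getD_eq_getElem?_getD,
    List.getElem?_eq_getElem (show i.toNat < xs.length by omega), Option.getD_some]

-- A's output in closed form: mirror each row of grid and of grid.reverse
theorem transform_eq_canon (grid : List (List Int)) :
    transform grid =
      grid.map (fun row => row ++ row.reverse) ++ grid.reverse.map (fun row => row ++ row.reverse) := by
  unfold transform
  simp only [PySem.List.pyRange_zero_natCast, List.map_map]
  refine congrArg₂ _ ?_ ?_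
  · rw [← map_range_getD (fun row => row ++ row.reverse) ([] : List Int) grid]
    refine List.map_congr_left (fun k hk => ?_)
    rw [List.mem_range] at hk
    simp [Function.comp, PySem.List.pyGetD_natCast, List.getD_eq_getElem?_getD,
      List.getElem?_map, List.getElem?_eq_getElem hk]
  · rw [← map_range_getD (fun row => row ++ row.reverse) ([] : List Int) grid.reverse,
      List.length_reverse]
    refine List.map_congr_left (fun k hk => ?_)
    rw [List.mem_range] at hk
    simp [Function.comp, PySem.List.pyGetD_natCast, List.getD_eq_getElem?_getD, hk]

-- B's inner comprehension builds row ++ row.reverse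
theorem rowB_eq (s : List Int) :
    (PySem.List.pyRange 0 (2 * (s.length : Int)) 1).map
      (fun c => PySem.List.pyGetD s (if c < (s.length : Int) then c else 2 * (s.length : Int) - 1 - c) 0)
    = s ++ s.reverse := by
  rw [PySem.List.pyRange_one_append 0 (s.length : Int) (2 * (s.length : Int)) (by positivity) (by omega),
    List.map_append]
  refine congrArg₂ _ ?_ ?_
  · calc (PySem.List.pyRange 0 (s.length : Int) 1).map
          (fun c => PySem.List.pyGetD s (if c < (s.length : Int) then c else 2 * (s.length : Int) - 1 - c) 0)
        = (PySem.List.pyRange 0 (s.length : Int) 1).map (fun j => PySem.List.pyGetD s j 0) := by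
          refine List.map_congr_left (fun c hc => ?_)
          rw [PySem.List.mem_pyRange_one] at hc
          rw [if_pos hc.2]
      _ = s := PySem.List.map_pyGetD_pyRange_zero' s 0
  · have base := map_range_getD_rev (id : Int → Int) 0 s
    rw [List.map_id] at base
    rw [PySem.List.pyRange_one, List.map_map]
    have hlen : (2 * (s.length : Int) - (s.length : Int)).toNat = s.length := by omega
    rw [hlen, ← base]
    refine List.map_congr_left (fun k hk => ?_)
    rw [List.mem_range] at hk
    have h1 : ¬ ((s.length : Int) + (k : Int) < (s.length : Int)) := by omega
    simp only [Function.comp, if_neg h1, id_eq]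
    rw [pyGetD_int_eq_getD s 0 _ (by omega) (by omega)]
    congr 1
    omega

-- B's output in the same closed form
theorem transform_alt_eq_canon (grid : List (List Int)) :
    transform_alt grid =
      grid.map (fun row => row ++ row.reverse) ++ grid.reverse.map (fun row => row ++ row.reverse) := by
  unfold transform_alt
  rw [PySem.List.foldl_append_singleton_eq_map, List.nil_append,
    PySem.List.pyRange_one_append 0 (grid.length : Int) (2 * (grid.length : Int)) (by positivity) (by omega),
    List.map_append]
  refine congrArg₂ _ ?_ ?_
  · rw [← map_range_getD (fun row => row ++ row.reverse) ([] : List Int) grid,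
      PySem.List.pyRange_zero_natCast, List.map_map]
    refine List.map_congr_left (fun k hk => ?_)
    rw [List.mem_range] at hk
    have h1 : ((k : Int) < (grid.length : Int)) := by omega
    simp only [Function.comp, if_pos h1, PySem.List.pyGetD_natCast]
    have hgetD : grid.getD k [] = PySem.List.pyGetD grid (k : Int) [] := by
      rw [PySem.List.pyGetD_natCast]
    rw [hgetD] at *
    exact rowB_eq _
  · rw [PySem.List.pyRange_one, List.map_map]
    have hlen : (2 * (grid.length : Int) - (grid.length : Int)).toNat = grid.length := by omega
    rw [hlen, ← map_range_getD_rev (fun row => row ++ row.reverse) ([] : List Int) grid]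
    refine List.map_congr_left (fun k hk => ?_)
    rw [List.mem_range] at hk
    have h1 : ¬ ((grid.length : Int) + (k : Int) < (grid.length : Int)) := by omega
    simp only [Function.comp, if_neg h1]
    rw [pyGetD_int_eq_getD grid [] _ (by omega) (by omega)]
    have hidx : (2 * (grid.length : Int) - 1 - ((grid.length : Int) + (k : Int))).toNat
        = grid.length - 1 - k := by omega
    rw [hidx]
    exact rowB_eq _

-- ===== VERDICT (by name: the statement is the Claim_ definition above) =====
theorem transform_spec : Claim_equal_transform := by
  intro grid _
  unfold Spec_transform
  rw [transform_eq_canon, transform_alt_eq_canon]
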